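-- pv_equiv track=rewrite | github.com/midedickson/datastructure | welding_rods.py | min_cost_balance_pole
-- ===== SOURCE A (Python) =====
-- def min_cost_balance_pole(rods):
--     n = len(rods)
--
--     # Sort rods in non-decreasing order
--     rods.sort()
--
--     # Initialize a 2D table to store the minimum cost of welding rods
--     dp = [[0] * n for _ in range(n)]
--
--     # Fill in the table using dynamic programming
--     for length in range(2, n + 1):
--         for i in range(n - length + 1):
--             j = i + length - 1
--             dp[i][j] = float("inf")
--
--             # Try all possible splits and find the minimum cost
--             for k in range(i, j):
--                 cost = rods[i] + rods[j] + dp[i][k] + dp[k + 1][j]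
--                 dp[i][j] = min(dp[i][j], cost)
--
--     # Return the minimum cost to create the balance pole
--     return dp[0][n - 1]
-- ===== SOURCE B (Python) =====
-- def min_cost_balance_pole(rods):
--     # The optimal split in A's DP is always at the last position, so the whole
--     # table collapses to a closed form: total length plus (n-2) copies of the
--     # minimum rod.  (A sorts `rods` in place; B does not mutate its argument.)
--     return sum(rods) + (len(rods) - 2) * min(rods)
-- ===== Notes on version B (the rewrite author's own statement) =====
-- stated objective: faster
-- what changed: Replaced the O(n^3) interval DP (sort + cubic table fill) by the closed form sum(rods) + (n-2)*min(rods), proved equal because the optimal split is always at the last position of the sorted interval; B also no longer sorts the caller's list in place.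
import Mathlib
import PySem

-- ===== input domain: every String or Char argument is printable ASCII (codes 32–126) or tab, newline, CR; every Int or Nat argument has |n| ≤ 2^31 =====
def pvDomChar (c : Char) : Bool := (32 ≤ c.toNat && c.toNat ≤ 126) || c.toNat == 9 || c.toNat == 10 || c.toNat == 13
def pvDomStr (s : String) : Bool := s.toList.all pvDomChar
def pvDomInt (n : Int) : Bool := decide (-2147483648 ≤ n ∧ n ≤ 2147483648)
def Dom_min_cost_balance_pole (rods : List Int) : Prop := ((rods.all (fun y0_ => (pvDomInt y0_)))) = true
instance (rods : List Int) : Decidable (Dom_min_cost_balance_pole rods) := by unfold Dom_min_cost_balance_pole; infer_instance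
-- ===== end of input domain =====

-- B replaces A's O(n^3) interval DP by the closed form sum(rods) + (n-2)*min(rods);
-- A sorts its argument in place, B does not (the equivalence proved is about the return value).

-- ===== PORT A =====
-- dp[i][j]; during A's execution every access is with in-range non-negative indices,
-- so the total pyGetD form is exact there.
def pvCell (dp : List (List Int)) (i j : Int) : Int :=
  PySem.List.pyGetD (PySem.List.pyGetD dp i []) j 0

-- `dp[i][j] = min(dp[i][j], cost)` with the running cell value as an Option
-- (none = the initial float('inf'), which any first comparison replaces)
def pvMinStep (c : Int → Int) (acc : Option Int) (k : Int) : Option Int :=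
  some (match acc with | none => c k | some m => min m (c k))

-- the inner `for k in range(i, j)` loop; the Option accumulator is exact because the
-- k-range is non-empty for every cell whose value is ever read or returned
def pvInner (a : List Int) (dp : List (List Int)) (i j : Int) : Int :=
  ((PySem.List.pyRange i j 1).foldl
    (pvMinStep (fun k => PySem.List.pyGetD a i 0 + PySem.List.pyGetD a j 0 +
                          pvCell dp i k + pvCell dp (k + 1) j)) none).getD 0

-- body of `for i in range(n - length + 1)`
def pvIStep (a : List Int) (length : Int) (dp : List (List Int)) (i : Int) : List (List Int) :=
  let j := i + length - 1
  PySem.List.pySetD dp i (PySem.List.pySetD (PySem.List.pyGetD dp i []) j (pvInner a dp i j))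

-- body of `for length in range(2, n + 1)` (n = len(rods) = a.length, unchanged by sorting)
def pvLStep (a : List Int) (dp : List (List Int)) (length : Int) : List (List Int) :=
  (PySem.List.pyRange 0 ((a.length : Int) - length + 1) 1).foldl (pvIStep a length) dp

def min_cost_balance_pole (rods : List Int) : Int :=
  let n : Int := rods.length
  let a := PySem.List.sorted rods (fun x => x) false
  let dp := (PySem.List.pyRange 2 (n + 1) 1).foldl (pvLStep a)
      (List.replicate rods.length (List.replicate rods.length (0 : Int)))
  pvCell dp 0 (n - 1)

-- ===== PORT B =====
-- min(rods) raises on [], which Pre_ excludes; under Pre_ min? is always some.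
def min_cost_balance_pole_alt (rods : List Int) : Int :=
  rods.sum + ((rods.length : Int) - 2) * (rods.min?.getD 0)

-- ===== PRECONDITION & SPEC =====
-- A raises IndexError (dp[0][-1] on the empty table) on [], and B's min([]) raises ValueError there
def Pre_min_cost_balance_pole (rods : List Int) : Prop := rods ≠ []
instance (rods : List Int) : Decidable (Pre_min_cost_balance_pole rods) := by
  unfold Pre_min_cost_balance_pole; infer_instance
def pvWitness_min_cost_balance_pole : List Int := [3, 1, 2]

def Spec_min_cost_balance_pole (rods : List Int) (out : Int) : Prop := out = min_cost_balance_pole_alt rods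
instance (rods : List Int) (out : Int) : Decidable (Spec_min_cost_balance_pole rods out) := by unfold Spec_min_cost_balance_pole; infer_instance

-- ===== CLAIM (what is proved, stated in full; the proofs are below) =====
def Claim_equal_min_cost_balance_pole : Prop := ∀ (rods : List Int), Dom_min_cost_balance_pole rods → Pre_min_cost_balance_pole rods → Spec_min_cost_balance_pole rods (min_cost_balance_pole rods)

-- ===== LEMMAS AND PROOFS =====

-- Nat-indexed view of a cell
def cellN (dp : List (List Int)) (i j : Nat) : Int := (dp.getD i []).getD j 0

-- the sum a[i] + … + a[j]
def pvS (a : List Int) (i j : Nat) : Int := ((a.drop i).take (j + 1 - i)).sum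

-- the DP's closed-form cell value for i ≤ j
def pvF (a : List Int) (i j : Nat) : Int := pvS a i j + ((j : Int) - i - 1) * a.getD i 0

-- sortedness in getD form
def pvMono (a : List Int) : Prop :=
  ∀ p q : Nat, p ≤ q → q < a.length → a.getD p 0 ≤ a.getD q 0

-- table shape
def pvDims (n : Nat) (dp : List (List Int)) : Prop :=
  dp.length = n ∧ ∀ i : Nat, i < n → (dp.getD i []).length = n

-- invariant: cells of span < L+1 hold pvF; of span exactly L+1 only for rows i < i0; rest 0
def pvInv2 (a : List Int) (L i0 : Nat) (dp : List (List Int)) : Prop :=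
  pvDims a.length dp ∧ ∀ i j : Nat, i < a.length → j < a.length →
    cellN dp i j = if i < j ∧ (j < i + L ∨ (j = i + L ∧ i < i0)) then pvF a i j else 0

def pvInv (a : List Int) (L : Nat) (dp : List (List Int)) : Prop := pvInv2 a L 0 dp

lemma pvCell_natCast (dp : List (List Int)) (i j : Nat) :
    pvCell dp (i : Int) (j : Int) = cellN dp i j := by
  simp [pvCell, cellN]

lemma pvS_split (a : List Int) (i k j : Nat) (hik : i ≤ k) (hkj : k < j) :
    pvS a i j = pvS a i k + pvS a (k + 1) j := by
  unfold pvS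
  have h := List.sum_take_add_sum_drop ((a.drop i).take (j + 1 - i)) (k + 1 - i)
  rw [← h, List.take_take, List.drop_take, List.drop_drop]
  have e1 : min (k + 1 - i) (j + 1 - i) = k + 1 - i := by omega
  have e2 : j + 1 - i - (k + 1 - i) = j + 1 - (k + 1) := by omega
  have e3 : i + (k + 1 - i) = k + 1 := by omega
  rw [e1, e2, e3]

lemma pvS_single (a : List Int) (j : Nat) (hj : j < a.length) :
    pvS a j j = a.getD j 0 := by
  unfold pvS
  have h1 : j + 1 - j = 1 := by omega
  rw [h1, List.drop_eq_getElem_cons hj, List.take_succ_cons, List.take_zero]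
  simp [List.getD_eq_getElem?_getD, List.getElem?_eq_getElem hj]

lemma pvF_self (a : List Int) (i : Nat) (hi : i < a.length) : pvF a i i = 0 := by
  unfold pvF
  rw [pvS_single a i hi]
  ring

-- cost(k) ≥ F i j for i ≤ k ≤ j-2 on a sorted list
lemma cost_ge (a : List Int) (ha : pvMono a) (i k j : Nat)
    (hik : i ≤ k) (hkj : k + 2 ≤ j) (hj : j < a.length) :
    pvF a i j ≤ a.getD i 0 + a.getD j 0 + pvF a i k + pvF a (k + 1) j := by
  have hsplit := pvS_split a i k j hik (by omega)
  unfold pvF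
  rw [hsplit]
  have h1 : a.getD i 0 ≤ a.getD (k + 1) 0 := ha i (k + 1) (by omega) (by omega)
  have h2 : a.getD i 0 ≤ a.getD j 0 := ha i j (by omega) hj
  have h3 : (0 : Int) ≤ (j : Int) - k - 2 := by
    have : (k : Int) + 2 ≤ j := by exact_mod_cast hkj
    omega
  push_cast
  nlinarith [mul_nonneg h3 (sub_nonneg.2 h1)]

-- cost(j-1) = F i j
lemma cost_last (a : List Int) (i j : Nat) (hij : i < j) (hj : j < a.length) :
    a.getD i 0 + a.getD j 0 + pvF a i (j - 1) + pvF a j j = pvF a i j := by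
  have hsplit := pvS_split a i (j - 1) j (by omega) (by omega)
  have hone : j - 1 + 1 = j := by omega
  rw [hone] at hsplit
  unfold pvF
  rw [hsplit, pvS_single a j hj]
  have hc : ((j : Int) - 1 : Int) = ((j - 1 : Nat) : Int) := by omega
  rw [← hc]
  ring

lemma foldmin_lb (c : Int → Int) (v : Int) :
    ∀ (ks : List Int) (acc : Option Int),
      (∀ k ∈ ks, v ≤ c k) → (acc = none ∨ ∃ m, acc = some m ∧ v ≤ m) →
      (ks.foldl (pvMinStep c) acc = none ∨
        ∃ m, ks.foldl (pvMinStep c) acc = some m ∧ v ≤ m) := by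
  intro ks
  induction ks with
  | nil => intro acc _ h2; simpa using h2
  | cons x t ih =>
      intro acc h1 h2
      simp only [List.foldl_cons]
      apply ih
      · intro k hk; exact h1 k (List.mem_cons_of_mem _ hk)
      · right
        rcases h2 with h | ⟨m, hm, hv⟩
        · exact ⟨c x, by simp [pvMinStep, h], h1 x (List.mem_cons_self)⟩
        · exact ⟨min m (c x), by simp [pvMinStep, hm], le_min hv (h1 x (List.mem_cons_self))⟩

-- the inner loop computes F i j when every cell it reads already holds F
lemma pvInner_eq (a : List Int) (ha : pvMono a) (dp : List (List Int)) (i j : Nat)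
    (hij : i < j) (hj : j < a.length)
    (hcells : ∀ k : Nat, i ≤ k → k < j →
        cellN dp i k = pvF a i k ∧ cellN dp (k + 1) j = pvF a (k + 1) j) :
    pvInner a dp (i : Int) (j : Int) = pvF a i j := by
  unfold pvInner
  set c : Int → Int := fun k => PySem.List.pyGetD a (i : Int) 0 + PySem.List.pyGetD a (j : Int) 0 +
      pvCell dp (i : Int) k + pvCell dp (k + 1) (j : Int) with hc
  -- value of the cost function at a Nat index i ≤ k < j
  have hcval : ∀ k : Nat, i ≤ k → k < j →
      c (k : Int) = a.getD i 0 + a.getD j 0 + pvF a i k + pvF a (k + 1) j := by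
    intro k h1 h2
    have e : ((k : Int) + 1) = ((k + 1 : Nat) : Int) := by push_cast; ring
    rw [hc]
    simp only [e, PySem.List.pyGetD_natCast, pvCell_natCast]
    rw [(hcells k h1 h2).1, (hcells k h1 h2).2]
  have hsplit : PySem.List.pyRange (i : Int) (j : Int) 1 =
      PySem.List.pyRange (i : Int) ((j : Int) - 1) 1 ++ [((j : Int) - 1)] := by
    have hle : (i : Int) ≤ (j : Int) - 1 := by
      have : (i : Int) < j := by exact_mod_cast hij
      omega
    have := PySem.List.pyRange_one_succ_right (a := (i : Int)) (b := (j : Int) - 1) hle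
    simpa using this
  rw [hsplit, List.foldl_append]
  -- every cost in the prefix is ≥ F i j
  have hpre : ∀ k ∈ PySem.List.pyRange (i : Int) ((j : Int) - 1) 1, pvF a i j ≤ c k := by
    intro k hk
    rw [PySem.List.mem_pyRange_one] at hk
    obtain ⟨hk1, hk2⟩ := hk
    have hk0 : 0 ≤ k := le_trans (by exact_mod_cast Nat.zero_le i) hk1
    obtain ⟨k0, rfl⟩ : ∃ k0 : Nat, k = (k0 : Int) := ⟨k.toNat, (Int.toNat_of_nonneg hk0).symm⟩
    have h1 : i ≤ k0 := by exact_mod_cast hk1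
    have h2 : k0 + 2 ≤ j := by omega
    rw [hcval k0 h1 (by omega)]
    exact cost_ge a ha i k0 j h1 h2 hj
  have hacc := foldmin_lb c (pvF a i j) (PySem.List.pyRange (i : Int) ((j : Int) - 1) 1) none hpre (Or.inl rfl)
  -- the last cost (at k = j-1) equals F i j
  have hlast : c ((j : Int) - 1) = pvF a i j := by
    have e1 : ((j : Int) - 1) = ((j - 1 : Nat) : Int) := by omega
    rw [e1, hcval (j - 1) (by omega) (by omega)]
    have e2 : j - 1 + 1 = j := by omega
    rw [e2]
    exact cost_last a i j hij hj
  rcases hacc with h | ⟨m, hm, hv⟩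
  · rw [h]; simp [pvMinStep, hlast]
  · rw [hm]; simp [pvMinStep, hlast, min_eq_right hv]

-- getD after set, pointwise
lemma getD_set_eq {X : Type} (l : List X) (i : Nat) (v d : X) (h : i < l.length) :
    (l.set i v).getD i d = v := by
  simp [List.getD_eq_getElem?_getD, h]

lemma getD_set_ne {X : Type} (l : List X) (i j : Nat) (v d : X) (h : j ≠ i) :
    (l.set j v).getD i d = l.getD i d := by
  simp [List.getD_eq_getElem?_getD, h]

-- writing one cell: pointwise effect of pvIStep
lemma cellN_pvIStep (a : List Int) (L : Nat) (dp : List (List Int)) (i0 : Nat)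
    (hdims : pvDims a.length dp) (hi0 : i0 < a.length) (hj0 : i0 + L < a.length)
    (i j : Nat) :
    cellN (pvIStep a ((L : Int) + 1) dp (i0 : Int)) i j =
      if i = i0 ∧ j = i0 + L then pvInner a dp (i0 : Int) ((i0 + L : Nat) : Int)
      else cellN dp i j := by
  obtain ⟨hlen, hrow⟩ := hdims
  unfold pvIStep
  have ej : (i0 : Int) + ((L : Int) + 1) - 1 = ((i0 + L : Nat) : Int) := by push_cast; ring
  rw [ej]
  simp only [PySem.List.pyGetD_natCast, PySem.List.pySetD_natCast]
  have hrowlen : (dp.getD i0 []).length = a.length := hrow i0 hi0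
  unfold cellN
  by_cases hii : i = i0
  · rw [hii, getD_set_eq dp i0 _ [] (by omega)]
    by_cases hjj : j = i0 + L
    · rw [hjj, if_pos ⟨rfl, rfl⟩, getD_set_eq _ _ _ 0 (by omega)]
    · rw [if_neg (by tauto), getD_set_ne _ j (i0 + L) _ 0 (Ne.symm hjj)]
  · rw [if_neg (by tauto), getD_set_ne dp i i0 _ [] (Ne.symm hii)]

lemma dims_pvIStep (a : List Int) (L : Nat) (dp : List (List Int)) (i0 : Nat)
    (hdims : pvDims a.length dp) (hi0 : i0 < a.length) :
    pvDims a.length (pvIStep a ((L : Int) + 1) dp (i0 : Int)) := by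
  obtain ⟨hlen, hrow⟩ := hdims
  unfold pvIStep
  have ej : (i0 : Int) + ((L : Int) + 1) - 1 = ((i0 + L : Nat) : Int) := by push_cast; ring
  rw [ej]
  simp only [PySem.List.pyGetD_natCast, PySem.List.pySetD_natCast]
  refine ⟨by simp [hlen], ?_⟩
  intro i hi
  by_cases hii : i = i0
  · rw [hii, getD_set_eq dp i0 _ [] (by omega), List.length_set]
    exact hrow i0 (hii ▸ hi)
  · rw [getD_set_ne dp i i0 _ [] (Ne.symm hii)]
    exact hrow i hi

-- the inner `for i` loop advances the row pointer of the invariant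
lemma inner_fold (a : List Int) (ha : pvMono a) (L : Nat) (hL : 1 ≤ L) :
    ∀ (c i0 : Nat) (dp : List (List Int)), i0 + c ≤ a.length - L →
      pvInv2 a L i0 dp →
      pvInv2 a L (i0 + c)
        ((PySem.List.pyRange (i0 : Int) ((i0 : Int) + (c : Int)) 1).foldl
          (pvIStep a ((L : Int) + 1)) dp) := by
  intro c
  induction c with
  | zero =>
      intro i0 dp _ hinv
      simpa [PySem.List.pyRange_one] using hinv
  | succ c ih =>
      intro i0 dp hbound hinv
      have hcons : PySem.List.pyRange (i0 : Int) ((i0 : Int) + ((c : Int) + 1)) 1 =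
          (i0 : Int) :: PySem.List.pyRange ((i0 : Int) + 1) ((i0 : Int) + ((c : Int) + 1)) 1 :=
        PySem.List.pyRange_one_cons (by omega)
      have e : ((c : Int) + 1) = (((c + 1 : Nat)) : Int) := by push_cast; ring
      rw [← e, hcons, List.foldl_cons]
      have hn : L < a.length := by omega
      have hi0 : i0 < a.length := by omega
      have hj0 : i0 + L < a.length := by omega
      obtain ⟨hdims, hcell⟩ := hinv
      -- the new cell value is pvF
      have hval : pvInner a dp (i0 : Int) ((i0 + L : Nat) : Int) = pvF a i0 (i0 + L) := by
        apply pvInner_eq a ha dp i0 (i0 + L) (by omega) hj0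
        intro k hk1 hk2
        constructor
        · by_cases h : k = i0
          · rw [h, hcell i0 i0 hi0 (by omega), if_neg (by omega), pvF_self a i0 hi0]
          · rw [hcell i0 k hi0 (by omega), if_pos ⟨by omega, Or.inl (by omega)⟩]
        · by_cases h : k + 1 = i0 + L
          · rw [h, hcell (i0 + L) (i0 + L) hj0 hj0, if_neg (by omega), pvF_self a (i0 + L) hj0]
          · rw [hcell (k + 1) (i0 + L) (by omega) hj0, if_pos ⟨by omega, Or.inl (by omega)⟩]
      -- the written table satisfies the invariant at i0 + 1
      have hinv' : pvInv2 a L (i0 + 1) (pvIStep a ((L : Int) + 1) dp (i0 : Int)) := by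
        refine ⟨dims_pvIStep a L dp i0 hdims hi0, ?_⟩
        intro i j hi hj
        rw [cellN_pvIStep a L dp i0 hdims hi0 hj0 i j]
        by_cases hij : i = i0 ∧ j = i0 + L
        · obtain ⟨rfl, rfl⟩ := hij
          rw [if_pos ⟨rfl, rfl⟩, hval, if_pos ⟨by omega, Or.inr ⟨rfl, by omega⟩⟩]
        · rw [if_neg hij, hcell i j hi hj]
          congr 1
          simp only [eq_iff_iff]
          constructor
          · rintro ⟨h1, h2⟩; exact ⟨h1, by omega⟩
          · rintro ⟨h1, h2 | ⟨h2, h3⟩⟩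
            · exact ⟨h1, Or.inl h2⟩
            · refine ⟨h1, Or.inr ⟨h2, ?_⟩⟩
              rcases Nat.lt_succ_iff_lt_or_eq.1 h3 with h | h
              · exact h
              · exact absurd (h ▸ h2) (by tauto)
          -- note: the (i,j) = (i0, i0+L) case is excluded by hij
      have e2 : (i0 : Int) + ((c : Int) + 1) = ((i0 + 1 : Nat) : Int) + (c : Int) := by
        push_cast; ring
      have e3 : ((i0 : Int) + 1) = ((i0 + 1 : Nat) : Int) := by push_cast; ring
      rw [e2, e3]
      have := ih (i0 + 1) (pvIStep a ((L : Int) + 1) dp (i0 : Int)) (by omega) hinv'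
      simpa [Nat.add_assoc, Nat.add_comm 1 c] using this

-- one pass of the outer `for length` loop
lemma lstep_inv (a : List Int) (ha : pvMono a) (L : Nat) (hL : 1 ≤ L)
    (dp : List (List Int)) (hinv : pvInv a L dp) :
    pvInv a (L + 1) (pvLStep a dp ((L : Int) + 1)) := by
  unfold pvLStep
  have erange : PySem.List.pyRange 0 ((a.length : Int) - ((L : Int) + 1) + 1) 1 =
      PySem.List.pyRange ((0 : Nat) : Int) (((0 : Nat) : Int) + ((a.length - L : Nat) : Int)) 1 := by
    rw [PySem.List.pyRange_one, PySem.List.pyRange_one]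
    congr 2
    omega
  rw [erange]
  have h := inner_fold a ha L hL (a.length - L) 0 dp (by omega) (by simpa [pvInv] using hinv)
  obtain ⟨hdims, hcell⟩ := h
  refine ⟨hdims, ?_⟩
  intro i j hi hj
  rw [hcell i j hi hj]
  congr 1
  simp only [eq_iff_iff]
  omega

-- the outer loop, from length L+1 up to L+m
lemma outer_fold (a : List Int) (ha : pvMono a) :
    ∀ (m L : Nat) (dp : List (List Int)), 1 ≤ L → pvInv a L dp →
      pvInv a (L + m)
        ((PySem.List.pyRange ((L : Int) + 1) ((L : Int) + 1 + (m : Int)) 1).foldl (pvLStep a) dp) := by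
  intro m
  induction m with
  | zero =>
      intro L dp _ hinv
      simpa [PySem.List.pyRange_one] using hinv
  | succ m ih =>
      intro L dp hL hinv
      have hcons : PySem.List.pyRange ((L : Int) + 1) ((L : Int) + 1 + ((m : Nat) + 1 : Nat)) 1 =
          ((L : Int) + 1) :: PySem.List.pyRange ((L : Int) + 2) ((L : Int) + 1 + ((m + 1 : Nat) : Int)) 1 := by
        have := PySem.List.pyRange_one_cons
          (a := (L : Int) + 1) (b := (L : Int) + 1 + ((m + 1 : Nat) : Int)) (by push_cast; omega)
        convert this using 3
      rw [hcons, List.foldl_cons]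
      have hstep := lstep_inv a ha L hL dp hinv
      have := ih (L + 1) (pvLStep a dp ((L : Int) + 1)) (by omega) hstep
      have e1 : ((L + 1 : Nat) : Int) + 1 = (L : Int) + 2 := by push_cast; ring
      have e2 : (L : Int) + 2 + (m : Int) = (L : Int) + 1 + ((m + 1 : Nat) : Int) := by
        push_cast; ring
      rw [e1] at this
      rw [e2] at this
      have e3 : L + 1 + m = L + (m + 1) := by omega
      rw [e3] at this
      exact this

-- the all-zero table satisfies the invariant at L = 1
lemma getD_replicate {X : Type} (n i : Nat) (x d : X) (h : i < n) :
    (List.replicate n x).getD i d = x := by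
  simp [List.getD_eq_getElem?_getD, h]

lemma init_inv (a : List Int) :
    pvInv a 1 (List.replicate a.length (List.replicate a.length (0 : Int))) := by
  refine ⟨⟨by simp, ?_⟩, ?_⟩
  · intro i hi
    rw [getD_replicate _ _ _ _ hi]
    simp
  · intro i j hi hj
    have hcond : ¬ (i < j ∧ (j < i + 1 ∨ (j = i + 1 ∧ i < 0))) := by omega
    rw [if_neg hcond]
    unfold cellN
    rw [getD_replicate _ _ _ _ hi, getD_replicate _ _ _ _ hj]

-- sortedness of the sorted list, in getD form
lemma sorted_mono (rods : List Int) : pvMono (PySem.List.sorted rods (fun x => x) false) := by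
  intro p q hpq hq
  set a := PySem.List.sorted rods (fun x => x) false with hdef
  have hp : p < a.length := by omega
  rw [List.getD_eq_getElem?_getD, List.getD_eq_getElem?_getD,
    List.getElem?_eq_getElem hp, List.getElem?_eq_getElem hq]
  simp only [Option.getD_some]
  rcases Nat.eq_or_lt_of_le hpq with h | h
  · subst h; rfl
  · have hpw := PySem.List.sorted_pairwise rods (fun x => x)
    rw [List.pairwise_iff_getElem] at hpw
    exact hpw p q hp hq h

-- min(rods) is the head of the sorted list
lemma min_eq_sorted_head (rods : List Int) (hne : rods ≠ []) :
    rods.min? = some ((PySem.List.sorted rods (fun x => x) false).getD 0 0) := by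
  set a := PySem.List.sorted rods (fun x => x) false with hdef
  have hlen : a.length = rods.length := PySem.List.length_sorted rods _ _
  have hane : a ≠ [] := by
    intro h
    apply hne
    have := hlen
    rw [h] at this
    exact List.eq_nil_of_length_eq_zero this.symm
  obtain ⟨h, t, hht⟩ := List.exists_cons_of_ne_nil hane
  rw [List.min?_eq_some_iff]
  constructor
  · rw [← PySem.List.mem_sorted rods (fun x => x) false, ← hdef, hht]
    simp
  · intro b hb
    have := PySem.List.key_head_sorted_le rods (fun x => x) (hdef ▸ hht) b hb
    simpa [hht] using this

-- ===== VERDICT (by name: the statement is the Claim_ definition above) =====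
theorem min_cost_balance_pole_spec : Claim_equal_min_cost_balance_pole := by
  unfold Claim_equal_min_cost_balance_pole
  intro rods _ hne
  unfold Spec_min_cost_balance_pole min_cost_balance_pole min_cost_balance_pole_alt
  simp only []
  set a := PySem.List.sorted rods (fun x => x) false with hadef
  have hlen : a.length = rods.length := PySem.List.length_sorted rods _ _
  set n := rods.length with hndef
  have hn1 : 1 ≤ n := by
    rcases rods with _ | ⟨x, t⟩
    · exact absurd rfl hne
    · simp [hndef]
  -- run the outer loop: lengths 2 .. n
  have hrange : PySem.List.pyRange 2 ((n : Int) + 1) 1 =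
      PySem.List.pyRange (((1 : Nat) : Int) + 1) (((1 : Nat) : Int) + 1 + ((n - 1 : Nat) : Int)) 1 := by
    congr 1
    push_cast
    omega
  have hinit : pvInv a 1 (List.replicate n (List.replicate n (0 : Int))) := by
    have := init_inv a
    rw [hlen] at this
    exact this
  have hfin := outer_fold a (sorted_mono rods) (n - 1) 1
    (List.replicate n (List.replicate n (0 : Int))) (by omega) hinit
  rw [← hrange] at hfin
  have hL : 1 + (n - 1) = n := by omega
  rw [hL] at hfin
  obtain ⟨_, hcell⟩ := hfin
  set dp := (PySem.List.pyRange 2 ((n : Int) + 1) 1).foldl (pvLStep a)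
      (List.replicate n (List.replicate n (0 : Int))) with hdpdef
  have hres : pvCell dp 0 ((n : Int) - 1) = cellN dp 0 (n - 1) := by
    have e : ((n : Int) - 1) = ((n - 1 : Nat) : Int) := by omega
    rw [e, show ((0 : Int) = ((0 : Nat) : Int)) from rfl, pvCell_natCast]
  rw [hres, hcell 0 (n - 1) (by omega) (by omega)]
  have hmin := min_eq_sorted_head rods hne
  rw [← hadef] at hmin
  have hsum : rods.sum = a.sum := ((PySem.List.sorted_perm rods (fun x => x) false).sum_eq).symm
  rcases Nat.lt_or_ge 1 n with hn2 | hn2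
  · -- n ≥ 2
    rw [if_pos (by omega)]
    unfold pvF
    have hS : pvS a 0 (n - 1) = a.sum := by
      unfold pvS
      rw [List.drop_zero]
      have : n - 1 + 1 - 0 = a.length := by omega
      rw [this, List.take_length]
    rw [hS, hmin]
    simp only [Option.getD_some]
    rw [hsum]
    have e : ((n - 1 : Nat) : Int) - ((0 : Nat) : Int) - 1 = (n : Int) - 2 := by omega
    rw [e]
  · -- n = 1
    have hn : n = 1 := by omega
    rw [if_neg (by omega), hmin]
    simp only [Option.getD_some]
    have hgd : a.getD 0 0 = a.sum := by
      have : a.length = 1 := by omega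
      obtain ⟨x, hx⟩ := List.length_eq_one_iff.1 this
      rw [hx]; simp
    rw [hgd, ← hsum, hn]
    ring
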